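-- pv_equiv track=rewrite | github.com/r-marcus/2048 | Final_2048.py | smushR
-- ===== SOURCE A (Python) =====
-- def smushR(masterList): #Move all non 0 values to the right of the 2D list
--     for col in range(len(masterList[0])):
--         nextFilled = len(masterList)-1
--         for row in range(len(masterList)-1,-1,-1):
--             if masterList[row][col] != 0:
--                 masterList[nextFilled][col] = masterList[row][col]
--                 if row != nextFilled and row != len(masterList)-1:
--                     masterList[row][col] = 0
--                 nextFilled -= 1
--     return masterList
-- ===== SOURCE B (Python) =====
-- def smushR(masterList):  # collect each column's non-zeros, pad zeros on top, rewrite in place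
--     n = len(masterList)
--     for col in range(len(masterList[0])):
--         nonzeros = [row[col] for row in masterList if row[col] != 0]
--         pad = n - len(nonzeros)
--         for row in range(n):
--             masterList[row][col] = 0 if row < pad else nonzeros[row - pad]
--     return masterList
-- ===== Notes on version B (the rewrite author's own statement) =====
-- stated objective: simpler
-- what changed: Per column, B gathers the non-zero values with a filtering comprehension and rewrites the column as zero-padding plus that list, instead of A's bottom-up two-pointer overwrite with a live write index and conditional zeroing.
import Mathlib
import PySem

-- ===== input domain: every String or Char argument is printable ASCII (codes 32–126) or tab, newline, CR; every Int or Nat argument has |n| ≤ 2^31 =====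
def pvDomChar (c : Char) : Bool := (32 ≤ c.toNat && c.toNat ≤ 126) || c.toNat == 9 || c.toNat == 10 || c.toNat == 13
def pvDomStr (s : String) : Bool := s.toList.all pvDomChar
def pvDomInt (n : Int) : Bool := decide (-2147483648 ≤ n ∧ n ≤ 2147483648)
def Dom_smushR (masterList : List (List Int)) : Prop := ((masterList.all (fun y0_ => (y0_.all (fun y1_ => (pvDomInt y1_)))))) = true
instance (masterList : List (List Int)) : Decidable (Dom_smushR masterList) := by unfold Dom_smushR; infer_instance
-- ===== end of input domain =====

-- B gathers each column's non-zeros and rewrites the column as zero-padding plus that list,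
-- instead of A's bottom-up write-index compaction; equivalence of the returned grid (both
-- Pythons mutate masterList in place; the final contents coincide, which is what is proved).


-- ===== PORT A =====
-- masterList[r][c] read; exact under Pre_ (r, c always in range there)
def pyCell (g : List (List Int)) (r c : Int) : Int :=
  PySem.List.pyGetD (PySem.List.pyGetD g r []) c 0

-- masterList[r][c] = v ; exact under Pre_ (r, c always in range there)
def pySetCell (g : List (List Int)) (r c : Int) (v : Int) : List (List Int) :=
  PySem.List.pySetD g r (PySem.List.pySetD (PySem.List.pyGetD g r []) c v)

-- the body of A's inner 'for row in range(len(masterList)-1,-1,-1)' loop; state = (masterList, nextFilled)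
def innerBodyA (col : Int) (st : List (List Int) × Int) (row : Int) : List (List Int) × Int :=
  if pyCell st.1 row col ≠ 0 then
    let g1 := pySetCell st.1 st.2 col (pyCell st.1 row col)
    let g2 := if row ≠ st.2 ∧ row ≠ PySem.List.len g1 - 1 then pySetCell g1 row col 0 else g1
    (g2, st.2 - 1)
  else st

def smushR (masterList : List (List Int)) : List (List Int) :=
  (PySem.List.pyRange 0 (PySem.List.len (PySem.List.pyGetD masterList 0 [])) 1).foldl
    (fun g col =>
      ((PySem.List.pyRange (PySem.List.len g - 1) (-1) (-1)).foldl (innerBodyA col)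
        (g, PySem.List.len g - 1)).1)
    masterList

-- ===== PORT B =====
def smushR_alt (masterList : List (List Int)) : List (List Int) :=
  let n := PySem.List.len masterList
  (PySem.List.pyRange 0 (PySem.List.len (PySem.List.pyGetD masterList 0 [])) 1).foldl
    (fun g col =>
      let nonzeros := (g.filter (fun row => PySem.List.pyGetD row col 0 != 0)).map
        (fun row => PySem.List.pyGetD row col 0)
      let pad := n - PySem.List.len nonzeros
      (PySem.List.pyRange 0 n 1).foldl
        (fun g row =>
          pySetCell g row col (if row < pad then 0 else PySem.List.pyGetD nonzeros (row - pad) 0))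
        g)
    masterList

-- ===== PRECONDITION & SPEC =====
-- Pre_ excludes exactly the inputs where the Python A raises IndexError: the empty grid
-- (masterList[0]) and ragged grids with a row shorter than the first row (masterList[row][col]).
def Pre_smushR (masterList : List (List Int)) : Prop :=
  masterList ≠ [] ∧ ∀ row ∈ masterList, (masterList.headD []).length ≤ row.length
instance (masterList : List (List Int)) : Decidable (Pre_smushR masterList) := by
  unfold Pre_smushR; infer_instance
def pvWitness_smushR : List (List Int) := [[2, 0], [0, 4]]

def Spec_smushR (masterList : List (List Int)) (out : List (List Int)) : Prop := out = smushR_alt masterList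
instance (masterList : List (List Int)) (out : List (List Int)) : Decidable (Spec_smushR masterList out) := by unfold Spec_smushR; infer_instance

-- ===== CLAIM (what is proved, stated in full; the proofs are below) =====
def Claim_equal_smushR : Prop := ∀ (masterList : List (List Int)), Dom_smushR masterList → Pre_smushR masterList → Spec_smushR masterList (smushR masterList)

-- ===== LEMMAS AND PROOFS =====

-- column col of g (read with default 0; exact when col is in range for every row)
def colv (g : List (List Int)) (col : Nat) : List Int := g.map (fun row => row.getD col 0)

-- g with column col replaced by c (pointwise row.set)
def setCol (g : List (List Int)) (col : Nat) (c : List Int) : List (List Int) :=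
  List.zipWith (fun row x => row.set col x) g c

-- the compacted column: zeros on top, the non-zeros (in order) at the bottom
def compact (n : Nat) (v : List Int) : List Int :=
  List.replicate (n - (v.filter (fun x => x != 0)).length) 0 ++ v.filter (fun x => x != 0)

theorem length_setCol (g : List (List Int)) (col : Nat) (c : List Int)
    (hc : c.length = g.length) : (setCol g col c).length = g.length := by
  simp [setCol, hc]

theorem getElem_setCol (g : List (List Int)) (col : Nat) (c : List Int)
    (hc : c.length = g.length) (i : Nat) (hi : i < g.length) :
    (setCol g col c)[i]'(by simp [setCol, hc]; omega) = g[i].set col (c.getD i 0) := by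
  have h2 : i < c.length := by omega
  simp [setCol, List.getD_eq_getElem?_getD, List.getElem?_eq_getElem h2]

theorem rows_setCol (g : List (List Int)) (col : Nat) (c : List Int)
    (hc : c.length = g.length) (row' : List Int) (hmem : row' ∈ setCol g col c) :
    ∃ row ∈ g, row'.length = row.length := by
  rw [List.mem_iff_getElem] at hmem
  obtain ⟨i, hi, hrow⟩ := hmem
  have hig : i < g.length := by simp [setCol, hc] at hi; omega
  refine ⟨g[i], List.getElem_mem hig, ?_⟩
  rw [← hrow, getElem_setCol g col c hc i hig]
  simp

theorem setCol_colv (g : List (List Int)) (col : Nat)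
    (h : ∀ row ∈ g, col < row.length) : setCol g col (colv g col) = g := by
  induction g with
  | nil => rfl
  | cons r t ih =>
    have hr : col < r.length := h r (by simp)
    simp only [colv, setCol, List.map_cons, List.zipWith_cons_cons]
    rw [List.getD_eq_getElem r 0 hr, List.set_getElem_self hr]
    exact congrArg _ (ih (fun row hrow => h row (by simp [hrow])))

theorem setCell_setCol (g : List (List Int)) (col : Nat) (c : List Int) (j : Nat) (x : Int)
    (hc : c.length = g.length) (hj : j < g.length)
    (hrow : ∀ row ∈ g, col < row.length) :
    pySetCell (setCol g col c) (j : Int) (col : Int) x = setCol g col (c.set j x) := by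
  have hlen : (setCol g col c).length = g.length := length_setCol g col c hc
  simp only [pySetCell, PySem.List.pySetD_natCast, PySem.List.pyGetD_natCast]
  rw [List.getD_eq_getElem _ _ (by omega), getElem_setCol g col c hc j hj, List.set_set]
  apply List.ext_getElem
  · simp [setCol, hc]
  · intro i hi1 hi2
    have hig : i < g.length := by simpa [hlen] using hi1
    rw [List.getElem_set]
    by_cases hij : j = i
    · subst hij
      rw [getElem_setCol g col (c.set j x) (by simp [hc]) j hj]
      simp [show j < c.length by omega]
    · rw [getElem_setCol g col c hc i hig, getElem_setCol g col (c.set j x) (by simp [hc]) i hig]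
      simp [if_neg hij]
      congr 1
      rcases Nat.lt_or_ge i c.length with hic | hic
      · simp [List.getD_eq_getElem _ _ hic, hij]
      · omega

theorem cell_setCol (g : List (List Int)) (col : Nat) (c : List Int) (j : Nat)
    (hc : c.length = g.length) (hj : j < g.length)
    (hrow : ∀ row ∈ g, col < row.length) :
    pyCell (setCol g col c) (j : Int) (col : Int) = c.getD j 0 := by
  have hlen : (setCol g col c).length = g.length := length_setCol g col c hc
  simp only [pyCell, PySem.List.pyGetD_natCast]
  rw [List.getD_eq_getElem _ _ (show j < (setCol g col c).length by omega),
    getElem_setCol g col c hc j hj]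
  have hcol : col < g[j].length := hrow _ (List.getElem_mem hj)
  rw [List.getD_eq_getElem _ _ (show col < (g[j].set col (c.getD j 0)).length by simpa using hcol)]
  rw [List.getElem_set_self]

-- the number of non-zero entries of v at or below row r
def khi (v : List Int) (r : Nat) : Nat := ((v.drop r).filter (fun x => x != 0)).length

-- the column after A's inner loop has processed rows n-1 .. r
def colAt (v : List Int) (n r : Nat) : List Int :=
  v.take r ++ (List.replicate (n - r - khi v r) 0 ++ (v.drop r).filter (fun x => x != 0))

theorem khi_le (v : List Int) (r : Nat) : khi v r ≤ v.length - r := by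
  have := List.length_filter_le (fun x => x != 0) (v.drop r)
  simpa [khi] using this

theorem length_colAt (v : List Int) (n r : Nat) (hr : r ≤ n) (hv : v.length = n) :
    (colAt v n r).length = n := by
  have h2 : khi v r ≤ v.length - r := khi_le v r
  simp only [colAt, List.length_append, List.length_take, List.length_replicate, khi] at h2 ⊢
  omega

-- rows n-1, n-2, …, 0 as Ints (the order A's inner countdown loop visits)
def rowsList : Nat → List Int
  | 0 => []
  | r + 1 => (r : Int) :: rowsList r

theorem pyRange_countdown (n : Nat) :
    PySem.List.pyRange ((n : Int) - 1) (-1) (-1) = rowsList n := by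
  induction n with
  | zero => rw [PySem.List.pyRange_neg_one_eq_nil (by norm_num)]; rfl
  | succ r ih =>
    rw [PySem.List.pyRange_neg_one_cons (by push_cast; omega), rowsList]
    have e1 : ((r + 1 : Nat) : Int) - 1 = (r : Int) := by push_cast; ring
    rw [e1, ih]

theorem stepDown (G : List (List Int)) (n col r : Nat) (hn : G.length = n)
    (hcol : ∀ row ∈ G, col < row.length) (hr : r < n) :
    innerBodyA (col : Int)
      (setCol G col (colAt (colv G col) n (r+1)), (n : Int) - 1 - (khi (colv G col) (r+1) : Int))
      (r : Int)
    = (setCol G col (colAt (colv G col) n r), (n : Int) - 1 - (khi (colv G col) r : Int)) := by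
  set v := colv G col with hvdef
  have hvlen : v.length = n := by simp [hvdef, colv, hn]
  have hrv : r < v.length := by omega
  have hk : khi v (r+1) ≤ n - (r+1) := by have := khi_le v (r+1); omega
  have hclen : (colAt v n (r+1)).length = n := length_colAt v n (r+1) (by omega) hvlen
  have hdrop : v.drop r = v[r] :: v.drop (r+1) := List.drop_eq_getElem_cons hrv
  have htake : v.take (r+1) = v.take r ++ [v[r]] := List.take_succ_eq_append_getElem hrv
  have htlen : (v.take r).length = r := by simp; omega
  have hkr : khi v r = (if v[r] != 0 then 1 else 0) + khi v (r+1) := by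
    rw [khi, hdrop, List.filter_cons]
    split <;> simp [khi] <;> omega
  have hgetr : (colAt v n (r+1))[r]'(by omega) = v[r] := by
    simp only [colAt]
    rw [List.getElem_append_left (by simp; omega)]
    simp
  have hcell : pyCell (setCol G col (colAt v n (r+1))) (r : Int) (col : Int) = v[r] := by
    rw [cell_setCol G col _ r (by omega) (by omega) hcol]
    rw [List.getD_eq_getElem _ _ (by omega), hgetr]
  simp only [innerBodyA, hcell]
  by_cases hz : v[r] = 0
  · rw [if_neg (by simpa using hz)]
    have hkr0 : khi v r = khi v (r+1) := by rw [hkr]; simp [hz]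
    have hcA : colAt v n r = colAt v n (r+1) := by
      simp only [colAt]
      rw [htake, hdrop, List.filter_cons, hkr0]
      simp only [hz]
      rw [show n - r - khi v (r+1) = (n - (r+1) - khi v (r+1)) + 1 from by omega,
        List.replicate_succ]
      simp [List.append_assoc]
    rw [hcA, hkr0]
  · rw [if_pos hz]
    have hjr' : r ≤ n - 1 - khi v (r+1) := by omega
    have hnf : (n : Int) - 1 - (khi v (r+1) : Int) = ((n - 1 - khi v (r+1) : Nat) : Int) := by omega
    rw [hnf, setCell_setCol G col (colAt v n (r+1)) (n - 1 - khi v (r+1)) (v[r])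
      (by omega) (by omega) hcol]
    have hlg1 : PySem.List.len (setCol G col ((colAt v n (r+1)).set (n - 1 - khi v (r+1)) (v[r]))) = (n : Int) := by
      rw [PySem.List.len_eq, length_setCol _ _ _ (by simp [hclen, hn]), hn]
    rw [hlg1]
    have hfr : (v.drop r).filter (fun x => x != 0) = v[r] :: (v.drop (r+1)).filter (fun x => x != 0) := by
      rw [hdrop, List.filter_cons]; simp [hz]
    have hkr1 : khi v r = 1 + khi v (r+1) := by rw [hkr]; simp [hz]
    by_cases hjr : n - 1 - khi v (r+1) = r
    · rw [if_neg (by push_cast; omega)]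
      have hset : (colAt v n (r+1)).set (n - 1 - khi v (r+1)) (v[r]) = colAt v n (r+1) := by
        rw [hjr, ← hgetr, List.set_getElem_self]
      rw [hset]
      have h0 : n - r - khi v r = 0 := by omega
      have h1 : n - (r+1) - khi v (r+1) = 0 := by omega
      have hcA : colAt v n r = colAt v n (r+1) := by
        simp only [colAt]
        rw [htake, hfr, h0, h1]
        simp [List.append_assoc]
        rw [htake, List.append_assoc, List.singleton_append]
      rw [hcA]
      refine Prod.ext rfl ?_
      simp only
      rw [hkr1]
      push_cast
      omega
    · rw [if_pos ⟨by push_cast; omega, by push_cast; omega⟩]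
      rw [setCell_setCol G col _ r 0 (by simp only [List.length_set, hclen, hn]) (by omega) hcol]
      have hz1 : 1 ≤ n - (r+1) - khi v (r+1) := by omega
      set z := n - (r+1) - khi v (r+1) with hzdef
      have hsets : ((colAt v n (r+1)).set (n - 1 - khi v (r+1)) (v[r])).set r 0 = colAt v n r := by
        have hsplit : colAt v n (r+1) = (v.take r ++ [v[r]]) ++ (List.replicate z 0 ++ (v.drop (r+1)).filter (fun x => x != 0)) := by
          simp only [colAt]
          rw [htake, ← hzdef]
        have hrepl : (List.replicate z 0).set (z-1) (v[r]) = List.replicate (z-1) 0 ++ [v[r]] := by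
          conv_lhs => rw [show z = (z-1)+1 by omega, List.replicate_succ']
          rw [List.set_append, if_neg (by simp only [List.length_replicate]; omega)]
          simp
        have hstep1 : (colAt v n (r+1)).set (n - 1 - khi v (r+1)) (v[r])
            = (v.take r ++ [v[r]]) ++ (List.replicate (z-1) 0 ++ ([v[r]] ++ (v.drop (r+1)).filter (fun x => x != 0))) := by
          rw [hsplit, List.set_append,
            if_neg (by simp only [List.length_append, List.length_cons, List.length_nil, htlen]; omega)]
          rw [show n - 1 - khi v (r+1) - (v.take r ++ [v[r]]).length = z - 1 from by
            simp only [List.length_append, List.length_cons, List.length_nil, htlen]; omega]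
          rw [List.set_append, if_pos (by simp only [List.length_replicate]; omega), hrepl]
          simp [List.append_assoc]
        rw [hstep1]
        rw [List.set_append,
          if_pos (by simp only [List.length_append, List.length_cons, List.length_nil, htlen]; omega)]
        have hset0 : (v.take r ++ [v[r]]).set r 0 = v.take r ++ [0] := by
          rw [List.set_append, if_neg (by simp only [htlen]; omega)]
          simp [htlen]
        rw [hset0]
        simp only [colAt]
        rw [hfr]
        rw [show n - r - khi v r = z from by omega, show z = (z-1)+1 from by omega,
          List.replicate_succ]
        simp [List.append_assoc]
      rw [hsets]
      refine Prod.ext rfl ?_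
      simp only
      rw [hkr1]
      push_cast
      omega

theorem loopA (G : List (List Int)) (n col : Nat) (hn : G.length = n)
    (hcol : ∀ row ∈ G, col < row.length) :
    ∀ r, r ≤ n →
      (rowsList r).foldl (innerBodyA (col : Int))
        (setCol G col (colAt (colv G col) n r), (n : Int) - 1 - (khi (colv G col) r : Int))
      = (setCol G col (colAt (colv G col) n 0), (n : Int) - 1 - (khi (colv G col) 0 : Int)) := by
  intro r
  induction r with
  | zero => intro _; rfl
  | succ r ih =>
    intro hrn
    rw [rowsList, List.foldl_cons, stepDown G n col r hn hcol (by omega)]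
    exact ih (by omega)

theorem stepA (g : List (List Int)) (n col : Nat) (hn : g.length = n)
    (hcol : ∀ row ∈ g, col < row.length) :
    ((PySem.List.pyRange (PySem.List.len g - 1) (-1) (-1)).foldl (innerBodyA (col : Int))
      (g, PySem.List.len g - 1)).1
    = setCol g col (compact n (colv g col)) := by
  have hv : (colv g col).length = n := by simp [colv, hn]
  have hlen : PySem.List.len g = (n : Int) := by rw [PySem.List.len_eq, hn]
  rw [hlen, pyRange_countdown]
  have hd : List.drop n (colv g col) = [] := List.drop_of_length_le (by omega)
  have ht : List.take n (colv g col) = colv g col := List.take_of_length_le (by omega)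
  have hkhin : khi (colv g col) n = 0 := by simp [khi, hd]
  have hcoln : colAt (colv g col) n n = colv g col := by simp [colAt, hkhin, hd, ht]
  have hloop := loopA g n col hn hcol n le_rfl
  rw [hcoln, setCol_colv g col hcol, hkhin] at hloop
  norm_num at hloop
  rw [hloop]
  exact rfl

theorem stepB (g : List (List Int)) (n col : Nat) (hn : g.length = n)
    (hcol : ∀ row ∈ g, col < row.length) :
    ((PySem.List.pyRange 0 ((n : Nat) : Int) 1).foldl
      (fun G row => pySetCell G row (col : Int)
        (if row < ((n : Nat) : Int) - PySem.List.len ((g.filter (fun row => PySem.List.pyGetD row (col : Int) 0 != 0)).map (fun row => PySem.List.pyGetD row (col : Int) 0)) then 0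
         else PySem.List.pyGetD ((g.filter (fun row => PySem.List.pyGetD row (col : Int) 0 != 0)).map (fun row => PySem.List.pyGetD row (col : Int) 0)) (row - (((n : Nat) : Int) - PySem.List.len ((g.filter (fun row => PySem.List.pyGetD row (col : Int) 0 != 0)).map (fun row => PySem.List.pyGetD row (col : Int) 0)))) 0))
      g)
    = setCol g col (compact n (colv g col)) := by
  have hv : (colv g col).length = n := by simp [colv, hn]
  have hnz : (g.filter (fun row => PySem.List.pyGetD row (col : Int) 0 != 0)).map (fun row => PySem.List.pyGetD row (col : Int) 0)
      = (colv g col).filter (fun x => x != 0) := by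
    simp only [PySem.List.pyGetD_natCast, colv]
    rw [List.filter_map]
    rfl
  rw [hnz]
  have hk : ((colv g col).filter (fun x => x != 0)).length ≤ n := by
    have := List.length_filter_le (fun x => x != 0) (colv g col)
    omega
  have hL : (compact n (colv g col)).length = n := by simp [compact]; omega
  rw [show PySem.List.pyRange 0 ((n : Nat) : Int) 1 = (List.range n).map (fun k : Nat => (k : Int)) from by
    rw [PySem.List.pyRange_one]; simp [← List.map_eq_flatMap]]
  rw [List.foldl_map]
  have loop : ∀ j, j ≤ n →
      (List.range j).foldl
        (fun G (k : Nat) => pySetCell G (k : Int) (col : Int)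
          (if (k : Int) < ((n : Nat) : Int) - PySem.List.len ((colv g col).filter (fun x => x != 0)) then 0
           else PySem.List.pyGetD ((colv g col).filter (fun x => x != 0)) ((k : Int) - (((n : Nat) : Int) - PySem.List.len ((colv g col).filter (fun x => x != 0)))) 0))
        g
      = setCol g col ((compact n (colv g col)).take j ++ (colv g col).drop j) := by
    intro j
    induction j with
    | zero => intro _; simp [setCol_colv g col hcol]
    | succ j ih =>
      intro hj
      rw [List.range_succ, List.foldl_append, ih (by omega), List.foldl_cons, List.foldl_nil]
      have hcj : ((compact n (colv g col)).take j ++ (colv g col).drop j).length = n := by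
        simp only [List.length_append, List.length_take, List.length_drop, hL, hv]; omega
      have hval : (if (j : Int) < ((n : Nat) : Int) - PySem.List.len ((colv g col).filter (fun x => x != 0)) then 0
           else PySem.List.pyGetD ((colv g col).filter (fun x => x != 0)) ((j : Int) - (((n : Nat) : Int) - PySem.List.len ((colv g col).filter (fun x => x != 0)))) 0)
          = (compact n (colv g col))[j]'(by omega) := by
        rw [PySem.List.len_eq]
        by_cases hjp : j < n - ((colv g col).filter (fun x => x != 0)).length
        · rw [if_pos (by push_cast; omega)]
          simp only [compact]
          rw [List.getElem_append_left (by simp only [List.length_replicate]; omega)]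
          simp
        · rw [if_neg (by push_cast; omega)]
          rw [show (j : Int) - (((n : Nat) : Int) - (((colv g col).filter (fun x => x != 0)).length : Int))
              = ((j - (n - ((colv g col).filter (fun x => x != 0)).length) : Nat) : Int) from by push_cast; omega]
          rw [PySem.List.pyGetD_natCast]
          simp only [compact]
          rw [List.getElem_append_right (by simp only [List.length_replicate]; omega)]
          rw [List.getD_eq_getElem _ _ (by omega)]
          congr 1
          simp
      rw [hval, setCell_setCol g col ((compact n (colv g col)).take j ++ (colv g col).drop j) j
        ((compact n (colv g col))[j]'(by omega)) (by rw [hcj, hn]) (by omega) hcol]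
      congr 1
      rw [List.set_append, if_neg (by simp only [List.length_take, hL]; omega)]
      rw [show j - ((compact n (colv g col)).take j).length = 0 from by
        simp only [List.length_take, hL]; omega]
      rw [List.drop_eq_getElem_cons (show j < (colv g col).length by omega), List.set_cons_zero]
      rw [List.take_succ_eq_append_getElem (by omega), List.append_assoc, List.singleton_append]
  have hfin := loop n le_rfl
  rw [List.take_of_length_le (by omega), List.drop_of_length_le (by omega), List.append_nil] at hfin
  exact hfin

theorem outerEq (m n : Nat) (f h : List (List Int) → Nat → List (List Int))
    (hf : ∀ G c, G.length = n → (∀ row ∈ G, m ≤ row.length) → c < m →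
      f G c = setCol G c (compact n (colv G c)))
    (hh : ∀ G c, G.length = n → (∀ row ∈ G, m ≤ row.length) → c < m →
      h G c = setCol G c (compact n (colv G c))) :
    ∀ (cs : List Nat), (∀ c ∈ cs, c < m) → ∀ G, G.length = n → (∀ row ∈ G, m ≤ row.length) →
      cs.foldl f G = cs.foldl h G := by
  intro cs
  induction cs with
  | nil => intro _ G _ _; rfl
  | cons c t ih =>
    intro hcs G hG hrows
    have hc : c < m := hcs c (by simp)
    have hL : (compact n (colv G c)).length = n := by
      have h1 : ((colv G c).filter (fun x => x != 0)).length ≤ n := by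
        have := List.length_filter_le (fun x => x != 0) (colv G c)
        simp [colv, hG] at this ⊢; omega
      simp [compact]; omega
    have hstep : f G c = h G c := by
      rw [hf G c hG hrows hc, hh G c hG hrows hc]
    have hG' : (f G c).length = n := by
      rw [hf G c hG hrows hc, length_setCol _ _ _ (by omega)]; exact hG
    have hrows' : ∀ row ∈ f G c, m ≤ row.length := by
      intro row hrow
      rw [hf G c hG hrows hc] at hrow
      obtain ⟨row0, hrow0, hlen⟩ := rows_setCol G c _ (by omega) row hrow
      rw [hlen]; exact hrows row0 hrow0
    rw [List.foldl_cons, List.foldl_cons, hstep]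
    exact ih (fun x hx => hcs x (by simp [hx])) (h G c) (by rw [← hstep]; exact hG')
      (by rw [← hstep]; exact hrows')

theorem smushR_spec : Claim_equal_smushR := by
  intro ml _ hpre
  obtain ⟨hne, hrows⟩ := hpre
  unfold Spec_smushR
  cases ml with
  | nil => exact absurd rfl hne
  | cons r0 t =>
    have hrows' : ∀ row ∈ r0 :: t, r0.length ≤ row.length := by
      simpa using hrows
    simp only [smushR, smushR_alt, PySem.List.pyGetD_zero_cons, PySem.List.len_eq]
    rw [show PySem.List.pyRange 0 ((r0.length : Nat) : Int) 1 = (List.range r0.length).map (fun k : Nat => (k : Int)) from by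
      rw [PySem.List.pyRange_one]; simp [← List.map_eq_flatMap]]
    rw [List.foldl_map, List.foldl_map]
    exact outerEq r0.length (r0 :: t).length _ _
      (fun G c hG hr hc => stepA G (r0 :: t).length c hG
        (fun row hrow => lt_of_lt_of_le hc (hr row hrow)))
      (fun G c hG hr hc => stepB G (r0 :: t).length c hG
        (fun row hrow => lt_of_lt_of_le hc (hr row hrow)))
      (List.range r0.length) (by simp) (r0 :: t) rfl hrows'
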